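-- pv_equiv track=rewrite | github.com/danmurphy1217/equit-ease | equit_ease/displayer/display.py | _build_plot
-- ===== SOURCE A (Python) =====
-- from typing import Any, List, Tuple, Set
--
-- def _build_plot(
--     x_axis: int, y_axis: int, x_axis_pattern: str, y_axis_pattern: str
-- ) -> List[List[str]]:
--     """
--     build plot used to display price and/or volume data.
--
--     :param x_axis -> ``int``: the number of columns for the plot
--     :param y_axis -> ``int``: the number of lines for the plot
--     :param x_axis_pattern: ``str``: the pattern to use for drawing the x axis
--     :param y_axis_pattern: ``str``: the pattern to use for drawing the y axis
--
--     :returns plot -> ``List[str]``: the plot represented as a one-dimensional array.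
--     """
--     plot = []
--     for i in range(y_axis):
--         x_axis_values = []
--         for j in range(x_axis):
--             if i == 0 or i == max(range(y_axis)):
--                 x_axis_values.append(x_axis_pattern)
--             else:
--                 if j == 0 or j == max(range(x_axis)):
--                     x_axis_values.append(y_axis_pattern)
--                 else:
--                     x_axis_values.append(" ")
--         plot.append(x_axis_values)
--
--     return plot
-- ===== SOURCE B (Python) =====
-- from typing import List
--
-- def _build_plot(
--     x_axis: int, y_axis: int, x_axis_pattern: str, y_axis_pattern: str
-- ) -> List[List[str]]:
--     if y_axis <= 0:
--         return []
--     border = [x_axis_pattern] * x_axis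
--     if x_axis >= 2:
--         interior = [y_axis_pattern] + [" "] * (x_axis - 2) + [y_axis_pattern]
--     else:
--         interior = [y_axis_pattern] * x_axis
--     return [
--         list(border) if i == 0 or i == y_axis - 1 else list(interior)
--         for i in range(y_axis)
--     ]
-- ===== Notes on version B (the rewrite author's own statement) =====
-- stated objective: simpler
-- what changed: B precomputes the two row shapes (border row and interior row) once and builds the grid by copying the right shape per row, removing A's per-cell inner loop, per-cell branches and its repeated max(range(...)) calls.
import Mathlib
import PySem

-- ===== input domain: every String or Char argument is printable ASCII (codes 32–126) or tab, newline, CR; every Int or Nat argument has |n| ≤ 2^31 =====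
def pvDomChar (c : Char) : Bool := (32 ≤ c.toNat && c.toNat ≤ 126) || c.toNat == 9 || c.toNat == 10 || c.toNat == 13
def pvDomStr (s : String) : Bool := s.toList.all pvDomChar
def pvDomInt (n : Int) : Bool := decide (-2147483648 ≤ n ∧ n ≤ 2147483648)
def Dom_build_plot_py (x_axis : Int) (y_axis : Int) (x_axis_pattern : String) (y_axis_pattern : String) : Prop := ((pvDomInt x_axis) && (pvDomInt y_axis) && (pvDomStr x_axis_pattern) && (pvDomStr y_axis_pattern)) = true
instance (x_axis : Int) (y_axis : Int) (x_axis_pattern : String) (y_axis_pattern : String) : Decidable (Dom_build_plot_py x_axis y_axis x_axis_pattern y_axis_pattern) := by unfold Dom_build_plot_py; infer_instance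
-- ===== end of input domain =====

-- B precomputes the two row shapes once and copies one per row, instead of A's per-cell inner loop (simpler decomposition).


-- ===== PORT A =====
-- literal port of A: two nested loops over range(), appending one cell per inner step;
-- 'i == max(range(y_axis))' / 'j == max(range(x_axis))' are ported via PySem.List.max?
-- (A only evaluates them on nonempty ranges, where max? = some of the maximum).
def build_plot_py (x_axis : Int) (y_axis : Int) (x_axis_pattern : String) (y_axis_pattern : String) : List (List String) :=
  (PySem.List.pyRange 0 y_axis 1).foldl (fun plot i =>
    let x_axis_values := (PySem.List.pyRange 0 x_axis 1).foldl (fun acc j =>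
      if i = 0 ∨ PySem.List.max? (PySem.List.pyRange 0 y_axis 1) (fun v => v) = some i then
        acc ++ [x_axis_pattern]
      else if j = 0 ∨ PySem.List.max? (PySem.List.pyRange 0 x_axis 1) (fun v => v) = some j then
        acc ++ [y_axis_pattern]
      else acc ++ [" "]) []
    plot ++ [x_axis_values]) []

-- ===== PORT B =====
def build_plot_py_alt (x_axis : Int) (y_axis : Int) (x_axis_pattern : String) (y_axis_pattern : String) : List (List String) :=
  if y_axis ≤ 0 then []
  else
    let border := List.replicate x_axis.toNat x_axis_pattern
    let interior :=
      if 2 ≤ x_axis then [y_axis_pattern] ++ List.replicate (x_axis - 2).toNat " " ++ [y_axis_pattern]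
      else List.replicate x_axis.toNat y_axis_pattern
    (PySem.List.pyRange 0 y_axis 1).map (fun i =>
      if i = 0 ∨ i = y_axis - 1 then border else interior)

-- ===== PRECONDITION & SPEC =====
def Spec_build_plot_py (x_axis : Int) (y_axis : Int) (x_axis_pattern : String) (y_axis_pattern : String) (out : List (List String)) : Prop := out = build_plot_py_alt x_axis y_axis x_axis_pattern y_axis_pattern
instance (x_axis : Int) (y_axis : Int) (x_axis_pattern : String) (y_axis_pattern : String) (out : List (List String)) : Decidable (Spec_build_plot_py x_axis y_axis x_axis_pattern y_axis_pattern out) := by unfold Spec_build_plot_py; infer_instance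

-- ===== CLAIM (what is proved, stated in full; the proofs are below) =====
def Claim_equal_build_plot_py : Prop := ∀ (x_axis : Int) (y_axis : Int) (x_axis_pattern : String) (y_axis_pattern : String), Dom_build_plot_py x_axis y_axis x_axis_pattern y_axis_pattern → Spec_build_plot_py x_axis y_axis x_axis_pattern y_axis_pattern (build_plot_py x_axis y_axis x_axis_pattern y_axis_pattern)

-- ===== LEMMAS AND PROOFS =====

-- max(range(0, n)) = n - 1 for positive n
lemma max_pyRange_id (n : Int) (h : 0 < n) :
    PySem.List.max? (PySem.List.pyRange 0 n 1) (fun v => v) = some (n - 1) := by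
  have hmem : (n - 1) ∈ PySem.List.pyRange 0 n 1 := by
    rw [PySem.List.mem_pyRange_one]; omega
  cases h' : PySem.List.max? (PySem.List.pyRange 0 n 1) (fun v => v) with
  | none =>
      rw [PySem.List.max?_eq_none_iff] at h'
      simp [h'] at hmem
  | some m =>
      have h1 : (n - 1 : Int) ≤ m := PySem.List.max?_isMax h' _ hmem
      have h2 : m ∈ PySem.List.pyRange 0 n 1 := PySem.List.max?_mem h'
      rw [PySem.List.mem_pyRange_one] at h2
      have : m = n - 1 := by omega
      simp [this]

-- interior row closed form
lemma interior_row (x : Int) (yp : String) :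
    (PySem.List.pyRange 0 x 1).map (fun j => if j = 0 ∨ j = x - 1 then yp else " ") =
    (if 2 ≤ x then [yp] ++ List.replicate (x - 2).toNat " " ++ [yp]
     else List.replicate x.toNat yp) := by
  by_cases hx2 : 2 ≤ x
  · rw [if_pos hx2]
    rw [PySem.List.pyRange_one_append 0 1 x (by omega) (by omega),
        PySem.List.pyRange_one_append 1 (x - 1) x (by omega) (by omega)]
    have h0 : PySem.List.pyRange 0 1 1 = [0] := PySem.List.pyRange_one_singleton 0
    have hl : PySem.List.pyRange (x - 1) x 1 = [x - 1] := by
      have := PySem.List.pyRange_one_singleton (x - 1)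
      simpa [sub_add_cancel] using this
    rw [h0, hl]
    simp only [List.map_append, List.map_cons, List.map_nil]
    have hmid : (PySem.List.pyRange 1 (x - 1) 1).map (fun j => if j = 0 ∨ j = x - 1 then yp else " ")
        = List.replicate (x - 2).toNat " " := by
      have hcongr : (PySem.List.pyRange 1 (x - 1) 1).map (fun j => if j = 0 ∨ j = x - 1 then yp else " ")
          = (PySem.List.pyRange 1 (x - 1) 1).map (fun _ => " ") := by
        apply List.map_congr_left
        intro j hj
        rw [PySem.List.mem_pyRange_one] at hj
        rw [if_neg (by omega)]
      rw [hcongr, List.map_const', PySem.List.length_pyRange_one]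
      congr 1
      omega
    rw [hmid]
    simp
  · rw [if_neg hx2]
    by_cases hx1 : x = 1
    · subst hx1
      have h01 : PySem.List.pyRange 0 1 1 = [0] := by
        simpa using PySem.List.pyRange_one_singleton 0
      rw [h01]
      simp
    · have : x ≤ 0 := by omega
      rw [PySem.List.pyRange_one_eq_nil (by omega)]
      simp [Int.toNat_of_nonpos this]

-- border row closed form
lemma border_row (x : Int) (xp : String) :
    (PySem.List.pyRange 0 x 1).map (fun _ => xp) = List.replicate x.toNat xp := by
  rw [List.map_const', PySem.List.length_pyRange_one]
  congr 1
  omega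

-- ===== VERDICT (by name: the statement is the Claim_ definition above) =====
theorem build_plot_py_spec : Claim_equal_build_plot_py := by
  intro x y xp yp _
  unfold Spec_build_plot_py build_plot_py build_plot_py_alt
  by_cases hy : y ≤ 0
  · rw [if_pos hy, PySem.List.pyRange_one_eq_nil (by omega)]
    simp
  · rw [if_neg hy]
    push Not at hy
    -- rewrite A's outer fold as a map
    have houter :
        ∀ (l : List Int) (acc : List (List String)) (f : Int → List String),
          l.foldl (fun plot i => plot ++ [f i]) acc = acc ++ l.map f := fun l acc f =>
      by rw [PySem.List.foldl_append_singleton_eq_map]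
    rw [max_pyRange_id y hy]
    -- the inner fold: turn the per-cell branch into appending a single computed cell
    have hinner : ∀ (i : Int),
        (PySem.List.pyRange 0 x 1).foldl (fun acc j =>
          if i = 0 ∨ (some (y - 1) : Option Int) = some i then acc ++ [xp]
          else if j = 0 ∨ PySem.List.max? (PySem.List.pyRange 0 x 1) (fun v => v) = some j then acc ++ [yp]
          else acc ++ [" "]) []
        = (PySem.List.pyRange 0 x 1).map (fun j =>
            if i = 0 ∨ (some (y - 1) : Option Int) = some i then xp
            else if j = 0 ∨ PySem.List.max? (PySem.List.pyRange 0 x 1) (fun v => v) = some j then yp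
            else " ") := by
      intro i
      have hbody : (fun (acc : List String) (j : Int) =>
          if i = 0 ∨ (some (y - 1) : Option Int) = some i then acc ++ [xp]
          else if j = 0 ∨ PySem.List.max? (PySem.List.pyRange 0 x 1) (fun v => v) = some j then acc ++ [yp]
          else acc ++ [" "])
          = (fun (acc : List String) (j : Int) => acc ++ [if i = 0 ∨ (some (y - 1) : Option Int) = some i then xp
              else if j = 0 ∨ PySem.List.max? (PySem.List.pyRange 0 x 1) (fun v => v) = some j then yp
              else " "]) := by
        funext acc j
        split_ifs <;> rfl
      rw [hbody, PySem.List.foldl_append_singleton_eq_map]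
      simp
    simp only [hinner]
    rw [houter]
    simp only [List.nil_append]
    apply List.map_congr_left
    intro i hi
    rw [PySem.List.mem_pyRange_one] at hi
    have hcond : (i = 0 ∨ (some (y - 1) : Option Int) = some i) ↔ (i = 0 ∨ i = y - 1) := by
      constructor <;> (rintro (h | h) <;> simp_all)
    by_cases hb : i = 0 ∨ i = y - 1
    · rw [if_pos hb]
      have : (PySem.List.pyRange 0 x 1).map (fun j =>
          if i = 0 ∨ (some (y - 1) : Option Int) = some i then xp
          else if j = 0 ∨ PySem.List.max? (PySem.List.pyRange 0 x 1) (fun v => v) = some j then yp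
          else " ") = (PySem.List.pyRange 0 x 1).map (fun _ => xp) := by
        apply List.map_congr_left
        intro j _
        rw [if_pos (hcond.mpr hb)]
      rw [this, border_row]
    · rw [if_neg hb]
      have hnc : ¬ (i = 0 ∨ (some (y - 1) : Option Int) = some i) := fun h => hb (hcond.mp h)
      have : (PySem.List.pyRange 0 x 1).map (fun j =>
          if i = 0 ∨ (some (y - 1) : Option Int) = some i then xp
          else if j = 0 ∨ PySem.List.max? (PySem.List.pyRange 0 x 1) (fun v => v) = some j then yp
          else " ") = (PySem.List.pyRange 0 x 1).map (fun j => if j = 0 ∨ j = x - 1 then yp else " ") := by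
        apply List.map_congr_left
        intro j hj
        rw [PySem.List.mem_pyRange_one] at hj
        rw [if_neg hnc, max_pyRange_id x (by omega)]
        have : ((some (x - 1) : Option Int) = some j) ↔ j = x - 1 := by
          constructor <;> (intro h; simp_all)
        simp only [this]
      rw [this, interior_row]
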